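-- pv_equiv track=rewrite | github.com/GuilhermeSantanaAndrade/python | POCs/outros/nota/nota.py | deletaMenorValor
-- ===== SOURCE A (Python) =====
-- def deletaMenorValor(lst, vezes = 1):
--     if (vezes < 1):
--         raise ValueError('Parâmetro recursao não é um valor válido')
--
--     i = float("inf")
--     idx_menor = -1
--     idx = -1
--
--     for nr in lst:
--         idx += 1
--         if nr < i:
--             i = nr
--             idx_menor = idx
--
--     if (idx_menor != -1):
--         lst.pop(idx_menor)
--
--     if (vezes == 1):
--         return lst
--     else:
--         return deletaMenorValor(lst, vezes-1)
-- ===== SOURCE B (Python) =====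
-- # B: sort the distinct values once, prefix-sum their counts to get each value's
-- # "number of smaller elements", then one pass keeps exactly the elements whose
-- # stable rank (smaller count + earlier equal ones) is >= min(vezes, len(lst)).
-- # O(n log n) vs A's O(vezes*n) repeated scan-and-pop recursion.  Return value
-- # only: A mutates lst in place, B leaves it untouched.
-- def deletaMenorValor(lst, vezes=1):
--     k = min(vezes, len(lst))
--     counts = {}
--     for v in lst:
--         counts[v] = counts.get(v, 0) + 1
--     below = {}
--     acc = 0
--     for v in sorted(counts):
--         below[v] = acc
--         acc += counts[v]
--     out = []
--     seen = {}
--     for v in lst: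
--         r = below[v] + seen.get(v, 0)
--         seen[v] = seen.get(v, 0) + 1
--         if r >= k:
--             out.append(v)
--     return out
-- ===== Notes on version B (the rewrite author's own statement) =====
-- stated objective: faster
-- what changed: B replaces A's recursive find-minimum-and-pop loop (one O(n) scan-and-pop per removal, mutating the list) with one sort of the distinct values, a prefix-sum of their counts, and a single pass keeping exactly the elements whose stable rank (smaller count plus earlier equal ones) is at least min(vezes, len(lst)).
-- outside the precondition, e.g. on deletaMenorValor([1, 2], 5000): A returns [], B returns []; on deletaMenorValor([1, 2], 950): A returns [], B returns []
import Mathlib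
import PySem

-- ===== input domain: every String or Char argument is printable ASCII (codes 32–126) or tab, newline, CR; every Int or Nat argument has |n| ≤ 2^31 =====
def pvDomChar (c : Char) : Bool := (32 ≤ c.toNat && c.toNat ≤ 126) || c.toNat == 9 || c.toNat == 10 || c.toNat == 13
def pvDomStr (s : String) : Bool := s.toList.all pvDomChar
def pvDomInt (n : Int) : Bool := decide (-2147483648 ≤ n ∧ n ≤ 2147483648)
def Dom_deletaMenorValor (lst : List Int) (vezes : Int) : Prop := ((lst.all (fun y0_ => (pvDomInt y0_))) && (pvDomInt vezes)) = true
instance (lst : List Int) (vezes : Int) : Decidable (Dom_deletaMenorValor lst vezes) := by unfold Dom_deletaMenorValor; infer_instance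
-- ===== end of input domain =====

-- B replaces A's recursive scan-and-pop loop with one sort of the distinct values,
-- a prefix-sum of their counts, and a single stable-rank filter pass; equivalence
-- is about the RETURN value only: A mutates lst in place, B leaves it untouched.

-- ===== PORT A =====
-- A's for-loop: state (i, idx_menor, idx); b = none plays float("inf")
def dmvScan (b : Option Int) (idx_menor idx : Int) : List Int → Option Int × Int × Int
  | [] => (b, idx_menor, idx)
  | nr :: rest =>
      let idx' := idx + 1
      if (match b with | none => true | some i => nr < i) then dmvScan (some nr) idx' idx' rest
      else dmvScan b idx_menor idx' rest

def deletaMenorValor (lst : List Int) (vezes : Int) : List Int :=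
  if vezes < 1 then lst
  else
    let r := dmvScan none (-1) (-1) lst
    let lst' := if r.2.1 ≠ -1 then
        match PySem.List.pop? lst r.2.1 with
        | some p => p.2
        | none => lst
      else lst
    if vezes = 1 then lst' else deletaMenorValor lst' (vezes - 1)
termination_by vezes.toNat
decreasing_by omega

-- ===== PORT B =====
def deletaMenorValor_alt (lst : List Int) (vezes : Int) : List Int :=
  let k := min vezes (lst.length : Int)
  let counts := lst.foldl (fun (d : PySem.Dict Int Int) v => d.insert v (d.getD v 0 + 1)) PySem.Dict.empty
  let below := ((PySem.List.sorted counts.keys (fun x => x) false).foldl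
      (fun (s : PySem.Dict Int Int × Int) v => (s.1.insert v s.2, s.2 + counts.getD v 0))
      (PySem.Dict.empty, 0)).1
  let res := lst.foldl (fun (s : List Int × PySem.Dict Int Int) v =>
      (if below.getD v 0 + s.2.getD v 0 ≥ k then s.1 ++ [v] else s.1,
       s.2.insert v (s.2.getD v 0 + 1))) ([], PySem.Dict.empty)
  res.1

-- ===== PRECONDITION & SPEC =====
-- Pre_ excludes vezes < 1, where A raises ValueError, and vezes > 900, where A's
-- depth-vezes recursion can overflow CPython's default recursion limit
-- (RecursionError); under a raised limit A still returns on such inputs and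
-- agrees with B there, so this cap is only a safety margin.
def Pre_deletaMenorValor (lst : List Int) (vezes : Int) : Prop := 1 ≤ vezes ∧ vezes ≤ 900
instance (lst : List Int) (vezes : Int) : Decidable (Pre_deletaMenorValor lst vezes) := by unfold Pre_deletaMenorValor; infer_instance
def pvWitness_deletaMenorValor : List Int × Int := ([3, 1, 2, 1], 2)

def Spec_deletaMenorValor (lst : List Int) (vezes : Int) (out : List Int) : Prop := out = deletaMenorValor_alt lst vezes
instance (lst : List Int) (vezes : Int) (out : List Int) : Decidable (Spec_deletaMenorValor lst vezes out) := by unfold Spec_deletaMenorValor; infer_instance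

-- ===== CLAIM (what is proved, stated in full; the proofs are below) =====
def Claim_equal_deletaMenorValor : Prop := ∀ (lst : List Int) (vezes : Int), Dom_deletaMenorValor lst vezes → Pre_deletaMenorValor lst vezes → Spec_deletaMenorValor lst vezes (deletaMenorValor lst vezes)

-- ===== LEMMAS AND PROOFS =====

-- reference function: keep v (arriving after the elements in `seen`) iff its
-- stable rank (#smaller in full + #equal in seen) is ≥ k
def dmvGo (full : List Int) (k : Int) : List Int → List Int → List Int
  | _, [] => []
  | seen, v :: rest =>
      if (full.countP (fun x => x < v) : Int) + (seen.countP (fun x => x = v) : Int) ≥ k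
      then v :: dmvGo full k (seen ++ [v]) rest
      else dmvGo full k (seen ++ [v]) rest

lemma dmvGo_all (full : List Int) (k : Int) (hk : k ≤ 0) :
    ∀ rest seen, dmvGo full k seen rest = rest := by
  intro rest
  induction rest with
  | nil => intro seen; rfl
  | cons v rest ih =>
      intro seen
      rw [dmvGo, if_pos (by omega), ih]

lemma dmvGo_shift (full1 full2 : List Int) (m : Int) (k : Int) :
    ∀ (rest seen1 seen2 : List Int),
      (∀ v ∈ rest, m ≤ v) →
      (∀ v : Int, (full1.countP (fun x => x < v) : Int)
          = full2.countP (fun x => x < v) + (if m < v then 1 else 0)) →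
      (∀ v : Int, (seen1.countP (fun x => x = v) : Int)
          = seen2.countP (fun x => x = v) + (if m = v then 1 else 0)) →
      dmvGo full1 (k + 1) seen1 rest = dmvGo full2 k seen2 rest := by
  intro rest
  induction rest with
  | nil => intro _ _ _ _ _; rfl
  | cons v rest ih =>
      intro seen1 seen2 hrest hfull hseen
      have hv : m ≤ v := hrest v (by simp)
      have h1 := hfull v
      have h2 := hseen v
      have hcond : ((full1.countP (fun x => x < v) : Int) + (seen1.countP (fun x => x = v) : Int) ≥ k + 1)
          ↔ ((full2.countP (fun x => x < v) : Int) + (seen2.countP (fun x => x = v) : Int) ≥ k) := by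
        rcases lt_or_eq_of_le hv with h | h
        · rw [if_pos h] at h1; rw [if_neg (by omega)] at h2; omega
        · rw [if_neg (by omega)] at h1; rw [if_pos h] at h2; omega
      have hseen' : ∀ w : Int, ((seen1 ++ [v]).countP (fun x => x = w) : Int)
          = (seen2 ++ [v]).countP (fun x => x = w) + (if m = w then 1 else 0) := by
        intro w
        simp only [List.countP_append]
        have := hseen w
        push_cast
        omega
      rw [dmvGo, dmvGo]
      by_cases hc : (full2.countP (fun x => x < v) : Int) + (seen2.countP (fun x => x = v) : Int) ≥ k
      · rw [if_pos hc, if_pos (hcond.mpr hc), ih _ _ (fun w hw => hrest w (by simp [hw])) hfull hseen']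
      · rw [if_neg hc, if_neg (fun h => hc (hcond.mp h)), ih _ _ (fun w hw => hrest w (by simp [hw])) hfull hseen']

lemma dmvGo_pref (full1 full2 : List Int) (m : Int) (k : Int) (hk : 0 ≤ k) :
    ∀ (P : List Int) (S seen1 seen2 : List Int),
      (∀ v ∈ P, m < v) → (∀ v ∈ S, m ≤ v) →
      (∀ v : Int, (full1.countP (fun x => x < v) : Int)
          = full2.countP (fun x => x < v) + (if m < v then 1 else 0)) →
      (∀ v : Int, (seen1.countP (fun x => x = v) : Int)
          = seen2.countP (fun x => x = v)) →
      full1.countP (fun x => x < m) = 0 →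
      seen1.countP (fun x => x = m) = 0 →
      dmvGo full1 (k + 1) seen1 (P ++ m :: S) = dmvGo full2 k seen2 (P ++ S) := by
  intro P
  induction P with
  | nil =>
      intro S seen1 seen2 _ hS hfull hseen hf0 hs0
      simp only [List.nil_append]
      rw [dmvGo, if_neg (by push_cast [hf0, hs0]; omega)]
      refine dmvGo_shift full1 full2 m k S _ seen2 hS hfull ?_
      intro w
      simp only [List.countP_append]
      have := hseen w
      by_cases hw : m = w
      · subst hw; simp; push_cast at this ⊢; omega
      · simp [hw]; push_cast at this ⊢; omega
  | cons v P ih =>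
      intro S seen1 seen2 hP hS hfull hseen hf0 hs0
      have hv : m < v := hP v (by simp)
      have h1 := hfull v
      rw [if_pos hv] at h1
      have h2 := hseen v
      simp only [List.cons_append]
      rw [dmvGo, dmvGo]
      have hseen' : ∀ w : Int, ((seen1 ++ [v]).countP (fun x => x = w) : Int)
          = (seen2 ++ [v]).countP (fun x => x = w) := by
        intro w
        simp only [List.countP_append]
        have := hseen w
        push_cast
        omega
      have hs0' : (seen1 ++ [v]).countP (fun x => x = m) = 0 := by
        simp only [List.countP_append, hs0]
        simp only [List.countP_cons, List.countP_nil]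
        simp [decide_eq_false (show ¬ v = m by omega)]
      by_cases hc : (full2.countP (fun x => x < v) : Int) + (seen2.countP (fun x => x = v) : Int) ≥ k
      · rw [if_pos hc, if_pos (by omega),
          ih S _ _ (fun w hw => hP w (by simp [hw])) hS hfull hseen' hf0 hs0']
      · rw [if_neg hc, if_neg (by omega),
          ih S _ _ (fun w hw => hP w (by simp [hw])) hS hfull hseen' hf0 hs0']

lemma dmvScan_some_spec : ∀ (rest : List Int) (m : Int) (j idx : Int),
    ∃ (m' q : Int), dmvScan (some m) j idx rest = (some m', q, idx + rest.length) ∧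
      ((m' = m ∧ q = j ∧ ∀ v ∈ rest, m ≤ v) ∨
       (∃ p s, rest = p ++ m' :: s ∧ q = idx + p.length + 1 ∧ m' < m ∧
          (∀ v ∈ p, m' < v) ∧ (∀ v ∈ s, m' ≤ v))) := by
  intro rest
  induction rest with
  | nil =>
      intro m j idx
      exact ⟨m, j, by simp [dmvScan], Or.inl ⟨rfl, rfl, by simp⟩⟩
  | cons v rest ih =>
      intro m j idx
      by_cases hv : v < m
      · rw [dmvScan]
        simp only [decide_eq_true_eq, if_pos hv]
        obtain ⟨m', q, heq, hcase⟩ := ih v (idx + 1) (idx + 1)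
        refine ⟨m', q, by rw [heq]; simp; ring_nf, ?_⟩
        rcases hcase with ⟨h1, h2, h3⟩ | ⟨p, s, hps, hq, hlt, hp, hs⟩
        · exact Or.inr ⟨[], rest, by simp [h1], by simp [h2], by omega, by simp, by simpa [h1] using h3⟩
        · exact Or.inr ⟨v :: p, s, by simp [hps], by simp [hq]; ring, by omega,
            by intro w hw; rcases List.mem_cons.mp hw with rfl | h; exacts [by omega, hp w h], hs⟩
      · rw [dmvScan]
        simp only [decide_eq_true_eq, if_neg hv]
        obtain ⟨m', q, heq, hcase⟩ := ih m j (idx + 1)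
        refine ⟨m', q, by rw [heq]; simp; ring_nf, ?_⟩
        rcases hcase with ⟨h1, h2, h3⟩ | ⟨p, s, hps, hq, hlt, hp, hs⟩
        · exact Or.inl ⟨h1, h2, by intro w hw; rcases List.mem_cons.mp hw with rfl | h; exacts [by omega, h3 w h]⟩
        · exact Or.inr ⟨v :: p, s, by simp [hps], by simp [hq]; ring, hlt,
            by intro w hw; rcases List.mem_cons.mp hw with rfl | h; exacts [by omega, hp w h], hs⟩

lemma dmvScan_none_spec (lst : List Int) (h : lst ≠ []) :
    ∃ (P : List Int) (m : Int) (S : List Int),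
      lst = P ++ m :: S ∧ (∀ v ∈ P, m < v) ∧ (∀ v ∈ S, m ≤ v) ∧
      (dmvScan none (-1) (-1) lst).2.1 = (P.length : Int) := by
  match lst, h with
  | v :: rest, _ =>
    have hstep : dmvScan none (-1) (-1) (v :: rest) = dmvScan (some v) 0 0 rest := by
      rw [dmvScan]; norm_num
    obtain ⟨m', q, heq, hcase⟩ := dmvScan_some_spec rest v 0 0
    rcases hcase with ⟨h1, h2, h3⟩ | ⟨p, s, hps, hq, hlt, hp, hs⟩
    · exact ⟨[], v, rest, by simp, by simp, by simpa [h1] using h3,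
        by rw [hstep, heq]; simp [h2]⟩
    · refine ⟨v :: p, m', s, by simp [hps], ?_, hs, by rw [hstep, heq]; simp; omega⟩
      intro w hw
      rcases List.mem_cons.mp hw with rfl | h
      · omega
      · exact hp w h

lemma A_step (P : List Int) (m : Int) (S : List Int) (lst : List Int)
    (hlst : lst = P ++ m :: S) (hbi : (dmvScan none (-1) (-1) lst).2.1 = (P.length : Int)) :
    (if (dmvScan none (-1) (-1) lst).2.1 ≠ -1 then
        match PySem.List.pop? lst (dmvScan none (-1) (-1) lst).2.1 with
        | some p => p.2
        | none => lst
      else lst) = P ++ S := by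
  have hne : (dmvScan none (-1) (-1) lst).2.1 ≠ -1 := by rw [hbi]; omega
  have hlen : P.length < lst.length := by rw [hlst]; simp
  rw [if_pos hne, hbi, PySem.List.pop?_natCast lst P.length hlen]
  have h1 : lst[P.length] = m := by
    subst hlst
    rw [List.getElem_append_right (by omega)]
    simp
  have h2 : lst.eraseIdx P.length = P ++ S := by
    subst hlst
    rw [List.eraseIdx_append_of_length_le (by omega)]
    simp
  simp [h2]

lemma count_shift (P : List Int) (m : Int) (S : List Int) :
    ∀ v : Int, (((P ++ m :: S).countP (fun x => x < v) : Int))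
      = ((P ++ S).countP (fun x => x < v) : Int) + if m < v then 1 else 0 := by
  intro v
  simp only [List.countP_append, List.countP_cons]
  by_cases h : m < v <;> simp [h] <;> push_cast <;> omega

lemma count_min_zero (P : List Int) (m : Int) (S : List Int)
    (hP : ∀ v ∈ P, m < v) (hS : ∀ v ∈ S, m ≤ v) :
    (P ++ m :: S).countP (fun x => x < m) = 0 := by
  rw [List.countP_eq_zero]
  intro w hw
  simp only [decide_eq_true_eq]
  rcases List.mem_append.mp hw with h | h
  · have := hP w h; omega
  · rcases List.mem_cons.mp h with rfl | h
    · omega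
    · have := hS w h; omega

lemma A_keep : ∀ (n : Nat) (vezes : Int), vezes.toNat = n → 1 ≤ vezes →
    ∀ lst : List Int,
      deletaMenorValor lst vezes = dmvGo lst (min vezes (lst.length : Int)) [] lst := by
  intro n
  induction n using Nat.strong_induction_on with
  | _ n ih =>
    intro vezes hn h1 lst
    rw [deletaMenorValor, if_neg (by omega)]
    rcases List.eq_nil_or_concat' lst with rfl | ⟨_, _, _⟩
    · -- empty list: scan finds nothing, nothing popped
      have hscan : dmvScan none (-1) (-1) ([] : List Int) = (none, -1, -1) := rfl
      simp only [hscan]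
      by_cases hv1 : vezes = 1
      · simp [hv1, dmvGo]
      · rw [if_neg hv1]
        simp only [ne_eq, not_true_eq_false, if_false, reduceIte]
        rw [ih (vezes - 1).toNat (by omega) (vezes - 1) rfl (by omega) []]
        rfl
    · have hne : lst ≠ [] := by simp_all
      obtain ⟨P, m, S, hlst, hP, hS, hbi⟩ := dmvScan_none_spec lst hne
      subst hlst
      have hstep := A_step P m S (P ++ m :: S) rfl hbi
      have hfull := count_shift P m S
      have hf0 : (P ++ m :: S).countP (fun x => x < m) = 0 :=
        count_min_zero P m S hP hS
      have hlen : (P ++ m :: S).length = P.length + S.length + 1 := by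
        rw [List.length_append, List.length_cons]; omega
      by_cases hv1 : vezes = 1
      · rw [if_pos hv1, hstep]
        have hk : min vezes ((P ++ m :: S).length : Int) = 0 + 1 := by
          rw [hlen]; push_cast; omega
        rw [hk]
        rw [dmvGo_pref (P ++ m :: S) (P ++ S) m 0 (le_refl 0) P S [] []
          hP hS hfull (by simp) hf0 (by simp)]
        exact (dmvGo_all (P ++ S) 0 (le_refl 0) (P ++ S) []).symm
      · rw [if_neg hv1, hstep]
        rw [ih (vezes - 1).toNat (by omega) (vezes - 1) rfl (by omega) (P ++ S)]
        have hk1 : 1 ≤ min vezes (((P ++ m :: S).length : Nat) : Int) := by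
          rw [hlen]; push_cast; omega
        have hk : min (vezes - 1) (((P ++ S).length : Nat) : Int)
            = min vezes (((P ++ m :: S).length : Nat) : Int) - 1 := by
          rw [hlen, List.length_append]; push_cast; omega
        rw [hk]
        have hsplit : min vezes (((P ++ m :: S).length : Nat) : Int)
            = (min vezes (((P ++ m :: S).length : Nat) : Int) - 1) + 1 := by omega
        conv_rhs => rw [hsplit]
        rw [dmvGo_pref (P ++ m :: S) (P ++ S) m
          (min vezes (((P ++ m :: S).length : Nat) : Int) - 1) (by omega) P S [] []
          hP hS hfull (by simp) hf0 (by simp)]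

lemma countP_mem_snoc (proc : List Int) (v : Int) (hv : v ∉ proc) :
    ∀ L : List Int, (L.countP (fun x => decide (x ∈ proc ++ [v])) : Int)
      = (L.countP (fun x => decide (x ∈ proc)) : Int) + L.count v := by
  intro L
  induction L with
  | nil => simp
  | cons x L ih =>
      simp only [List.countP_cons, List.count_cons, List.mem_append, List.mem_singleton,
        Bool.decide_or] at ih ⊢
      by_cases hx : x = v
      · subst hx
        simp only [decide_eq_false hv, decide_eq_true (show x = x from rfl)]
        push_cast at ih ⊢
        simp only [BEq.rfl]
        simp
        omega
      · by_cases hp : x ∈ proc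
        · simp only [decide_eq_true hp, decide_eq_false hx]
          push_cast at ih ⊢
          simp [hx]
          omega
        · simp only [decide_eq_false hp, decide_eq_false hx]
          push_cast at ih ⊢
          simp [hx]
          omega

lemma below_fold (lst : List Int) :
    ∀ (ks proc : List Int) (b : PySem.Dict Int Int) (acc : Int),
      ks.Pairwise (fun a b => a < b) →
      (∀ u ∈ proc, ∀ w ∈ ks, u < w) →
      (∀ x ∈ lst, x ∈ proc ∨ x ∈ ks) →
      acc = (lst.countP (fun x => decide (x ∈ proc)) : Int) →
      (∀ w ∈ proc, b.getD w 0 = (lst.countP (fun x => x < w) : Int)) →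
      ∀ w ∈ lst,
        ((ks.foldl (fun (s : PySem.Dict Int Int × Int) v =>
            (s.1.insert v s.2, s.2 + (lst.count v : Int))) (b, acc)).1).getD w 0
          = (lst.countP (fun x => x < w) : Int) := by
  intro ks
  induction ks with
  | nil =>
      intro proc b acc _ _ h4 _ h5 w hw
      rcases h4 w hw with h | h
      · exact h5 w h
      · cases h
  | cons v ks ih =>
      intro proc b acc hpair h2 h4 hacc h5 w hw
      rw [List.foldl_cons]
      have hvp : v ∉ proc := fun hmem => absurd (h2 v hmem v (by simp)) (lt_irrefl v)
      have hpc := List.pairwise_cons.mp hpair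
      refine ih (proc ++ [v]) (b.insert v acc) (acc + (lst.count v : Int)) hpc.2 ?_ ?_ ?_ ?_ w hw
      · intro u hu x hx
        rcases List.mem_append.mp hu with h | h
        · exact h2 u h x (by simp [hx])
        · simp at h; subst h; exact hpc.1 x hx
      · intro x hx
        rcases h4 x hx with h | h
        · exact Or.inl (by simp [h])
        · rcases List.mem_cons.mp h with rfl | h
          · exact Or.inl (by simp)
          · exact Or.inr h
      · rw [countP_mem_snoc proc v hvp lst, hacc]
      · intro x hx
        rcases List.mem_append.mp hx with h | h
        · rw [PySem.Dict.getD_insert, if_neg (by have := h2 x h v (by simp); omega)]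
          exact h5 x h
        · simp at h; subst h
          rw [PySem.Dict.getD_insert, if_pos rfl, hacc]
          congr 1
          refine List.countP_congr ?_
          intro y hy
          simp only [decide_eq_true_eq]
          constructor
          · intro hyp; exact h2 y hyp x (by simp)
          · intro hyx
            rcases h4 y hy with h | h
            · exact h
            · rcases List.mem_cons.mp h with rfl | h
              · omega
              · have := hpc.1 y h; omega

lemma B3_fold (lst : List Int) (k : Int) (below : PySem.Dict Int Int)
    (hb : ∀ v ∈ lst, below.getD v 0 = (lst.countP (fun x => x < v) : Int)) :
    ∀ (rest acc : List Int) (d : PySem.Dict Int Int) (seen : List Int),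
      (∀ v ∈ rest, v ∈ lst) →
      (∀ v : Int, d.getD v 0 = (seen.countP (fun x => x = v) : Int)) →
      (rest.foldl (fun (s : List Int × PySem.Dict Int Int) v =>
          (if below.getD v 0 + s.2.getD v 0 ≥ k then s.1 ++ [v] else s.1,
           s.2.insert v (s.2.getD v 0 + 1))) (acc, d)).1
        = acc ++ dmvGo lst k seen rest := by
  intro rest
  induction rest with
  | nil => intro acc d seen _ _; simp [dmvGo]
  | cons v rest ih =>
      intro acc d seen hsub hd
      rw [List.foldl_cons, dmvGo]
      dsimp only
      have hv : v ∈ lst := hsub v (by simp)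
      have hd' : ∀ w : Int, (d.insert v (d.getD v 0 + 1)).getD w 0
          = ((seen ++ [v]).countP (fun x => x = w) : Int) := by
        intro w
        rw [PySem.Dict.getD_insert]
        simp only [List.countP_append]
        by_cases hw : w = v
        · subst hw; simp [hd w]
        · rw [if_neg hw, hd w]
          simp [decide_eq_false (show ¬ v = w by omega)]
      have hcnd : (below.getD v 0 + d.getD v 0 ≥ k)
          ↔ ((lst.countP (fun x => x < v) : Int) + (seen.countP (fun x => x = v) : Int) ≥ k) := by
        rw [hb v hv, hd v]
      by_cases hc : below.getD v 0 + d.getD v 0 ≥ k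
      · rw [if_pos hc, if_pos (hcnd.mp hc),
          ih (acc ++ [v]) _ _ (fun w hw => hsub w (by simp [hw])) hd']
        simp
      · rw [if_neg hc, if_neg (fun h => hc (hcnd.mpr h)),
          ih acc _ _ (fun w hw => hsub w (by simp [hw])) hd']

lemma B_keep (lst : List Int) (vezes : Int) :
    deletaMenorValor_alt lst vezes = dmvGo lst (min vezes (lst.length : Int)) [] lst := by
  unfold deletaMenorValor_alt
  simp only [PySem.Dict.foldl_insert_getD_add_one_eq_counter, PySem.Dict.getD_counter,
    PySem.Dict.keys_counter]
  have hks : (PySem.List.sorted (PySem.Set.ofList lst) (fun x => x) false).Pairwise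
      (fun a b => a < b) := by
    have h1 := PySem.List.sorted_pairwise (PySem.Set.ofList lst) (fun x => x)
    have h2 : (PySem.List.sorted (PySem.Set.ofList lst) (fun x => x) false).Nodup :=
      (PySem.List.sorted_perm (PySem.Set.ofList lst) (fun x => x) false).nodup_iff.mpr
        (PySem.Set.nodup_ofList lst)
    exact (h1.and h2).imp (fun h => lt_of_le_of_ne h.1 h.2)
  have hbelow := below_fold lst (PySem.List.sorted (PySem.Set.ofList lst) (fun x => x) false)
    [] PySem.Dict.empty 0 hks (by simp)
    (fun x hx => Or.inr ((PySem.List.mem_sorted _ _ _ _).mpr ((PySem.Set.mem_ofList _ _).mpr hx)))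
    (by simp) (by simp)
  rw [B3_fold lst (min vezes (lst.length : Int)) _ hbelow lst [] PySem.Dict.empty []
    (fun v hv => hv) (by intro v; simp [PySem.Dict.getD])]
  simp

-- ===== VERDICT (by name: the statement is the Claim_ definition above) =====
theorem deletaMenorValor_spec : Claim_equal_deletaMenorValor := by
  intro lst vezes _ hpre
  unfold Spec_deletaMenorValor
  rw [A_keep vezes.toNat vezes rfl hpre.1 lst, B_keep]
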